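-- pv_equiv track=rewrite | github.com/Gomi-coder/StepByStep | recursion/4779.py | cantor_set
-- ===== SOURCE A (Python) =====
-- def cantor_set(target_str):
--     total_len = len(target_str)
--
--     if total_len < 3: return target_str
--
--     num_of_sections = total_len//3
--
--     first_section_str = target_str[:num_of_sections]
--     third_section_str = target_str[-num_of_sections:]
--     second_section_str = " " * num_of_sections
--
--     return cantor_set(first_section_str) + second_section_str + cantor_set(third_section_str)
-- ===== SOURCE B (Python) =====
-- def cantor_set(target_str):
--     # Iterative level-order worklist of (text, active) segments instead of recursion.
--     segments = [(target_str, True)]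
--     while any(active for _, active in segments):
--         new_segments = []
--         for text, active in segments:
--             if active and len(text) >= 3:
--                 n = len(text) // 3
--                 new_segments.append((text[:n], True))
--                 new_segments.append((" " * n, False))
--                 new_segments.append((text[-n:], True))
--             else:
--                 new_segments.append((text, False))
--         segments = new_segments
--     return "".join(text for text, _ in segments)
-- ===== Notes on version B (the rewrite author's own statement) =====
-- stated objective: alternative
-- what changed: Replaces the top-down recursion by an iterative level-order worklist of (text, active) segments that is repeatedly expanded in place until no active segment remains, then joined left to right.
import Mathlib
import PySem

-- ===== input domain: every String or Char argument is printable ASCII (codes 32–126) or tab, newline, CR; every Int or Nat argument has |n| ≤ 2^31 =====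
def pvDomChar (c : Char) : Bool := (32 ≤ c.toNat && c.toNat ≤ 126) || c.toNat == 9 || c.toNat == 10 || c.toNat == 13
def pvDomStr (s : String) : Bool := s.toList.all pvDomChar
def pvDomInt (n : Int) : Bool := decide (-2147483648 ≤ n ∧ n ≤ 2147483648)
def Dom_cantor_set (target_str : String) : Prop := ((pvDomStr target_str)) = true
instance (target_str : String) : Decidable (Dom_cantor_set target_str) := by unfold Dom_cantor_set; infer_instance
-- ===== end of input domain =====

-- B replaces A's recursion by an iterative worklist of tagged segments (objective: alternative).

-- ===== PORT A =====
-- recursive helper on the code points (A's recursion, step for step; num_of_sections inlined)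
def cantorL (cs : List Char) : List Char :=
  if cs.length < 3 then cs
  else
    cantorL (PySem.List.slice cs none (some ((cs.length / 3 : Nat) : Int)))      -- target_str[:num_of_sections]
      ++ List.replicate (cs.length / 3) ' '                                      -- " " * num_of_sections
      ++ cantorL (PySem.List.slice cs (some (-((cs.length / 3 : Nat) : Int))) none)  -- target_str[-num_of_sections:]
termination_by cs.length
decreasing_by
  · rw [PySem.List.slice_to_natCast]
    simp only [List.length_take]
    omega
  · rw [PySem.List.slice_from_neg_natCast cs (cs.length / 3) (by omega)]
    simp only [List.length_drop]
    omega

def cantor_set (target_str : String) : String := String.ofList (cantorL target_str.toList)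

-- ===== PORT B =====
-- one pass of B's inner for-loop over one segment (n = len(text)//3 inlined)
def stepSeg (seg : List Char × Bool) : List (List Char × Bool) :=
  if seg.2 && decide (3 ≤ seg.1.length) then
    [(seg.1.take (seg.1.length / 3), true),
     (List.replicate (seg.1.length / 3) ' ', false),
     (seg.1.drop (seg.1.length - seg.1.length / 3), true)]
  else
    [(seg.1, false)]

-- B's while-loop; the fuel only makes it total (the input length is always enough, see runSegs_eq)
def runSegs : Nat → List (List Char × Bool) → List Char
  | 0, segs => (segs.map Prod.fst).flatten
  | fuel + 1, segs =>
      if segs.any Prod.snd then runSegs fuel (segs.flatMap stepSeg)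
      else (segs.map Prod.fst).flatten

def cantor_set_alt (target_str : String) : String :=
  String.ofList (runSegs target_str.toList.length [(target_str.toList, true)])
-- ===== PRECONDITION & SPEC =====
def Spec_cantor_set (target_str : String) (out : String) : Prop := out = cantor_set_alt target_str
instance (target_str : String) (out : String) : Decidable (Spec_cantor_set target_str out) := by unfold Spec_cantor_set; infer_instance

-- ===== CLAIM (what is proved, stated in full; the proofs are below) =====
def Claim_equal_cantor_set : Prop := ∀ (target_str : String), Dom_cantor_set target_str → Spec_cantor_set target_str (cantor_set target_str)

-- ===== LEMMAS AND PROOFS =====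

-- the value a finished segment contributes to the output
def segVal (seg : List Char × Bool) : List Char :=
  if seg.2 then cantorL seg.1 else seg.1

theorem cantorL_short {cs : List Char} (h : cs.length < 3) : cantorL cs = cs := by
  rw [cantorL]; simp [h]

theorem cantorL_long {cs : List Char} (h : 3 ≤ cs.length) :
    cantorL cs = cantorL (cs.take (cs.length / 3)) ++ List.replicate (cs.length / 3) ' '
      ++ cantorL (cs.drop (cs.length - cs.length / 3)) := by
  rw [cantorL, if_neg (by omega), PySem.List.slice_to_natCast,
    PySem.List.slice_from_neg_natCast cs (cs.length / 3) (by omega)]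

theorem stepSeg_val (seg : List Char × Bool) :
    ((stepSeg seg).map segVal).flatten = segVal seg := by
  by_cases ha : seg.2 = true
  · by_cases hl : 3 ≤ seg.1.length
    · simp [stepSeg, segVal, ha, hl, cantorL_long hl]
    · simp [stepSeg, segVal, ha, hl, cantorL_short (cs := seg.1) (by omega)]
  · simp [stepSeg, segVal, ha]

theorem stepSeg_len {seg : List Char × Bool} {fuel : Nat}
    (h : seg.2 = true → seg.1.length ≤ fuel + 1) :
    ∀ s ∈ stepSeg seg, s.2 = true → s.1.length ≤ fuel := by
  intro s hs hact
  unfold stepSeg at hs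
  split at hs
  · rename_i hcond
    simp only [Bool.and_eq_true, decide_eq_true_eq] at hcond
    have hm := h hcond.1
    have h3 := hcond.2
    simp only [List.mem_cons, List.not_mem_nil, or_false] at hs
    rcases hs with h1 | h1 | h1
    · subst h1; simp only [List.length_take]; omega
    · subst h1; simp at hact
    · subst h1; simp only [List.length_drop]; omega
  · simp only [List.mem_cons, List.not_mem_nil, or_false] at hs
    subst hs; simp at hact

theorem flatten_step (segs : List (List Char × Bool)) :
    ((segs.flatMap stepSeg).map segVal).flatten = (segs.map segVal).flatten := by
  induction segs with
  | nil => simp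
  | cons s t ih => simp [List.flatMap_cons, ih, stepSeg_val s]

theorem runSegs_eq (fuel : Nat) (segs : List (List Char × Bool))
    (h : ∀ s ∈ segs, s.2 = true → s.1.length ≤ fuel) :
    runSegs fuel segs = (segs.map segVal).flatten := by
  induction fuel generalizing segs with
  | zero =>
    simp only [runSegs]
    congr 1
    apply List.map_congr_left
    intro s hs
    by_cases ha : s.2 = true
    · have : s.1.length = 0 := by have := h s hs ha; omega
      simp [segVal, ha, cantorL_short (cs := s.1) (by omega)]
    · simp [segVal, ha]
  | succ m ih =>
    simp only [runSegs]
    split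
    · rw [ih _ ?_]
      · exact flatten_step segs
      · intro s hs hact
        obtain ⟨t, ht, hst⟩ := List.mem_flatMap.mp hs
        exact stepSeg_len (h t ht) s hst hact
    · rename_i hno
      congr 1
      apply List.map_congr_left
      intro s hs
      have hsf : s.2 = false := by
        cases hsnd : s.2
        · rfl
        · exact absurd (List.any_eq_true.mpr ⟨s, hs, hsnd⟩) hno
      simp [segVal, hsf]

-- ===== VERDICT (by name: the statement is the Claim_ definition above) =====
theorem cantor_set_spec : Claim_equal_cantor_set := by
  intro s _
  unfold Spec_cantor_set cantor_set cantor_set_alt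
  rw [runSegs_eq _ _ (by intro t ht hact; simp only [List.mem_cons, List.not_mem_nil, or_false] at ht; rw [ht])]
  simp [segVal]
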